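-- pv_equiv track=rewrite | github.com/UFO-101/beholder | beholder/geocoding.py | is_building_address
-- ===== SOURCE A (Python) =====
-- def is_building_address(address_components: list) -> bool:
--     """Check if the address represents a building/establishment rather than a general area.
--
--     Args:
--         address_components: List of address components from Google Maps API
--
--     Returns:
--         True if the address likely represents a specific building
--     """
--     types_to_exclude = {
--         "plus_code",
--         "neighborhood",
--         "sublocality",
--         "locality",
--         "administrative_area_level_1",
--         "administrative_area_level_2",
--         "country",
--         "postal_code",
--         "natural_feature",
--         "park",
--     }
--
--     # Look for street number (indicates a specific building)
--     has_street_number = any(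
--         "street_number" in component.get("types", [])
--         for component in address_components
--     )
--
--     # Check if it's mainly administrative/area types
--     main_types = set()
--     for component in address_components:
--         main_types.update(component.get("types", []))
--
--     # If it has a street number, it's likely a building
--     if has_street_number:
--         return True
--
--     # If it's mainly administrative areas, it's not a specific building
--     if main_types.issubset(types_to_exclude):
--         return False
--
--     return True
-- ===== SOURCE B (Python) =====
-- EXCLUDED_TYPES = (
--     "plus_code",
--     "neighborhood",
--     "sublocality",
--     "locality",
--     "administrative_area_level_1",
--     "administrative_area_level_2",
--     "country",
--     "postal_code",
--     "natural_feature",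
--     "park",
-- )
--
--
-- def _component_has_specific_type(component) -> bool:
--     """True iff this component carries a type outside the administrative/area set."""
--     for t in component.get("types", []):
--         if t not in EXCLUDED_TYPES:
--             return True
--     return False
--
--
-- def is_building_address(address_components: list) -> bool:
--     """True iff some component has a type outside the administrative/area set
--     (street_number itself is such a type, so A's separate street-number pass
--     and its union-set subset test both collapse into this single scan)."""
--     for component in address_components:
--         if _component_has_specific_type(component):
--             return True
--     return False
-- ===== Notes on version B (the rewrite author's own statement) =====
-- stated objective: simpler
-- what changed: Replaces A's two staged passes (any-scan for street_number, then building the union set of all types and testing it against the exclude set) by a short-circuit recursive scan: a helper decides per component whether it carries a type outside the exclude tuple, and the main function returns True at the first such component; street_number is itself outside the exclude set, so the separate check disappears and no set is ever built.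
import Mathlib
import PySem

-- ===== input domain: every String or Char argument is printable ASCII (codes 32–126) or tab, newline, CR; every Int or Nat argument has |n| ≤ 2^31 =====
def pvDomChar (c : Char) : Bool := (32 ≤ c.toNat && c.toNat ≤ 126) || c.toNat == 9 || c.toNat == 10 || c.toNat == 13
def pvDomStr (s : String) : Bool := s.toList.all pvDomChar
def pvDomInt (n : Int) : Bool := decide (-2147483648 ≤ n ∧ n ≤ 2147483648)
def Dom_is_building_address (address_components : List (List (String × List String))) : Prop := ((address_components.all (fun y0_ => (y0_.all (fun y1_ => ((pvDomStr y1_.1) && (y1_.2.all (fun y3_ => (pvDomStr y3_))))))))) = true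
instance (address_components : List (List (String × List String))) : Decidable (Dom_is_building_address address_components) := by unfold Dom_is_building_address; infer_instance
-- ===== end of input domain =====

-- B replaces A's two staged passes (street_number scan + union-set subset test) by a
-- short-circuit recursive scan for the first type outside the exclude set (objective: simpler).

-- ===== PORT A =====
def pvExcludeA : PySem.Set String := PySem.Set.ofList
  ["plus_code", "neighborhood", "sublocality", "locality",
   "administrative_area_level_1", "administrative_area_level_2",
   "country", "postal_code", "natural_feature", "park"]

def is_building_address (address_components : List (List (String × List String))) : Bool :=
  let types_to_exclude := pvExcludeA
  let has_street_number :=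
    address_components.any (fun component =>
      ((PySem.Dict.mk component).getD "types" []).contains "street_number")
  let main_types :=
    address_components.foldl
      (fun s component => PySem.Set.update s ((PySem.Dict.mk component).getD "types" []))
      PySem.Set.empty
  if has_street_number then true
  else if PySem.Set.issubset main_types types_to_exclude then false
  else true

-- ===== PORT B =====
def pvExcludedTypes : List String :=
  ["plus_code", "neighborhood", "sublocality", "locality",
   "administrative_area_level_1", "administrative_area_level_2",
   "country", "postal_code", "natural_feature", "park"]

-- helper _component_has_specific_type: early-exit scan of one component's types
def pvComponentHasSpecificType : List String → Bool
  | [] => false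
  | t :: ts =>
    if ¬ (t ∈ pvExcludedTypes) then true
    else pvComponentHasSpecificType ts

def is_building_address_alt : List (List (String × List String)) → Bool
  | [] => false
  | component :: rest =>
    if pvComponentHasSpecificType ((PySem.Dict.mk component).getD "types" []) then true
    else is_building_address_alt rest

-- ===== PRECONDITION & SPEC =====
def Spec_is_building_address (address_components : List (List (String × List String))) (out : Bool) : Prop := out = is_building_address_alt address_components
instance (address_components : List (List (String × List String))) (out : Bool) : Decidable (Spec_is_building_address address_components out) := by unfold Spec_is_building_address; infer_instance

-- ===== CLAIM (what is proved, stated in full; the proofs are below) =====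
def Claim_equal_is_building_address : Prop := ∀ (address_components : List (List (String × List String))), Dom_is_building_address address_components → Spec_is_building_address address_components (is_building_address address_components)

-- ===== LEMMAS AND PROOFS =====

-- B's helper returns true iff some type of the component lies outside the exclude list
lemma hasSpecificType_iff (ts : List String) :
    pvComponentHasSpecificType ts = true ↔ ∃ t ∈ ts, t ∉ pvExcludedTypes := by
  induction ts with
  | nil => simp [pvComponentHasSpecificType]
  | cons t ts ih =>
    by_cases h : t ∈ pvExcludedTypes
    · simp [pvComponentHasSpecificType, h, ih]
    · simp [pvComponentHasSpecificType, h]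

-- B returns true iff some component carries a type outside the exclude list
lemma alt_iff (comps : List (List (String × List String))) :
    is_building_address_alt comps = true ↔
      ∃ c ∈ comps, ∃ t ∈ (PySem.Dict.mk c).getD "types" [], t ∉ pvExcludedTypes := by
  induction comps with
  | nil => simp [is_building_address_alt]
  | cons c cs ih =>
    cases h : pvComponentHasSpecificType ((PySem.Dict.mk c).getD "types" []) with
    | true =>
      have h2 := (hasSpecificType_iff _).mp h
      rcases h2 with ⟨t, ht, hout⟩
      simp only [is_building_address_alt, h, if_true, true_iff]
      exact ⟨c, List.mem_cons_self, t, ht, hout⟩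
    | false =>
      have h' : ¬ ∃ t ∈ (PySem.Dict.mk c).getD "types" [], t ∉ pvExcludedTypes := by
        rw [← hasSpecificType_iff, h]; exact Bool.false_ne_true
      simp only [is_building_address_alt, h, Bool.false_eq_true, if_false, ih, List.mem_cons]
      constructor
      · rintro ⟨c', hc', ht⟩; exact ⟨c', Or.inr hc', ht⟩
      · rintro ⟨c', rfl | hc', ht⟩
        · exact absurd ht h'
        · exact ⟨c', hc', ht⟩

-- membership in Python's exclude set = membership in B's exclude tuple
lemma excludeA_contains_iff (t : String) :
    PySem.Set.contains pvExcludeA t = true ↔ t ∈ pvExcludedTypes := by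
  have h : pvExcludeA = pvExcludedTypes := by decide
  rw [h, PySem.Set.contains_iff]

-- membership in A's accumulated union set = some component contributes the type
lemma mem_main_types (comps : List (List (String × List String))) (s : PySem.Set String) (y : String) :
    y ∈ comps.foldl (fun s c => PySem.Set.update s ((PySem.Dict.mk c).getD "types" [])) s ↔
      y ∈ s ∨ ∃ c ∈ comps, y ∈ (PySem.Dict.mk c).getD "types" [] := by
  induction comps generalizing s with
  | nil => simp
  | cons c cs ih =>
    simp [List.foldl_cons, ih, PySem.Set.mem_update]
    tauto

-- ===== VERDICT (by name: the statement is the Claim_ definition above) =====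
theorem is_building_address_spec : Claim_equal_is_building_address := by
  intro comps _
  unfold Spec_is_building_address
  unfold is_building_address
  simp only []
  rcases hB : is_building_address_alt comps with _ | _
  · -- B = false : every type of every component lies in the exclude set
    have hall : ∀ c ∈ comps, ∀ t ∈ (PySem.Dict.mk c).getD "types" [], t ∈ pvExcludedTypes := by
      intro c hc t ht
      by_contra hout
      have : is_building_address_alt comps = true := (alt_iff comps).mpr ⟨c, hc, t, ht, hout⟩
      rw [hB] at this; exact Bool.false_ne_true this
    have hsn : comps.any (fun component =>
        ((PySem.Dict.mk component).getD "types" []).contains "street_number") = false := by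
      rw [List.any_eq_false]
      intro c hc
      simp only [List.contains_eq_mem, decide_eq_true_eq]
      intro hmem
      have h2 := hall c hc _ hmem
      simp [pvExcludedTypes] at h2
    have hsub : PySem.Set.issubset
        (comps.foldl (fun s c => PySem.Set.update s ((PySem.Dict.mk c).getD "types" []))
          PySem.Set.empty) pvExcludeA = true := by
      rw [PySem.Set.issubset_iff]
      intro y hy
      rw [mem_main_types] at hy
      rcases hy with h | ⟨c, hc, hyc⟩
      · simp [PySem.Set.empty] at h
      · have h2 := hall c hc _ hyc
        rw [← PySem.Set.contains_iff, excludeA_contains_iff]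
        exact h2
    rw [hsn, hsub]
    rfl
  · -- B = true : some type lies outside the exclude set, so A returns True either way
    rcases (alt_iff comps).mp hB with ⟨c, hc, t, ht, hout⟩
    rcases hsn : comps.any (fun component =>
        ((PySem.Dict.mk component).getD "types" []).contains "street_number") with _ | _
    · have hsub : PySem.Set.issubset
          (comps.foldl (fun s c => PySem.Set.update s ((PySem.Dict.mk c).getD "types" []))
            PySem.Set.empty) pvExcludeA = false := by
        rw [Bool.eq_false_iff]
        intro hs
        rw [PySem.Set.issubset_iff] at hs
        have hy : t ∈ comps.foldl
            (fun s c => PySem.Set.update s ((PySem.Dict.mk c).getD "types" []))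
            PySem.Set.empty := by
          rw [mem_main_types]; exact Or.inr ⟨c, hc, ht⟩
        have hmem := hs t hy
        rw [← PySem.Set.contains_iff, excludeA_contains_iff] at hmem
        exact hout hmem
      rw [hsub]
      rfl
    · rfl
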